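-- pv_equiv track=rewrite | github.com/yonsweng/ps | boj/26972.py | dfs
-- ===== SOURCE A (Python) =====
-- def dfs(u, p, h, adj, avg, sol):
--     sum_balance = 0
--
--     for v in adj[u]:
--         if v == p:
--             continue
--         balance = dfs(v, u, h, adj, avg, sol)
--         if balance > 0:
--             sol.append((v, u, balance))
--         elif balance < 0:
--             sol.append((u, v, -balance))
--
--         sum_balance += balance
--
--     return sum_balance + h[u] - avg
-- ===== SOURCE B (Python) =====
-- def dfs(u, p, h, adj, avg, sol):
--     # Iterative explicit-stack post-order traversal; same sol mutation and return value.
--     stack = [(u, p, 0, 0)]  # (node, parent, next child index, accumulated balance)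
--     ret = None
--     while stack:
--         node, par, i, acc = stack.pop()
--         if ret is not None:
--             balance = ret
--             v = adj[node][i - 1]
--             if balance > 0:
--                 sol.append((v, node, balance))
--             elif balance < 0:
--                 sol.append((node, v, -balance))
--             acc += balance
--             ret = None
--         ns = adj[node]
--         while i < len(ns) and ns[i] == par:
--             i += 1
--         if i < len(ns):
--             stack.append((node, par, i + 1, acc))
--             stack.append((ns[i], node, 0, 0))
--         else:
--             ret = acc + h[node] - avg
--     return ret
-- ===== Notes on version B (the rewrite author's own statement) =====
-- stated objective: alternative
-- what changed: The recursive post-order DFS is replaced by an iterative explicit-stack traversal whose frames carry (node, parent, next child index, accumulated balance), emitting each child's transfer edge right after the child's subtree finishes, so sol order and the return value are identical without recursion.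
import Mathlib
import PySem

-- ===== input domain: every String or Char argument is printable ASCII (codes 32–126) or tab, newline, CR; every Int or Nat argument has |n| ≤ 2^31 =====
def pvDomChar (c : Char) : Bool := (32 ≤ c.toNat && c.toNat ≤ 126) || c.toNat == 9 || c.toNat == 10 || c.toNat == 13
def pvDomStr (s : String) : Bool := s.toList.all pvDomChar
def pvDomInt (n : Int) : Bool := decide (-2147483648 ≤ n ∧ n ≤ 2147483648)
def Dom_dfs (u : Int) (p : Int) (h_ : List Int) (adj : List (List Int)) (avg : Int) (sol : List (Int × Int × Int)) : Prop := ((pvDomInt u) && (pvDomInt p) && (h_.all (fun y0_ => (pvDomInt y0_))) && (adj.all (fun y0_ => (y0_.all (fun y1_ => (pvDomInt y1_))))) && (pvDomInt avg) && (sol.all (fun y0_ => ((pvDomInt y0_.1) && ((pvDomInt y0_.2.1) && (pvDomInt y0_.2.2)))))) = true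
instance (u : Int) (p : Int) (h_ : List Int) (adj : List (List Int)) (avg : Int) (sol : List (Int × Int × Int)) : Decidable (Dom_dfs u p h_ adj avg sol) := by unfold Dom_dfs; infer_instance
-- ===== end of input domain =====

-- B replaces the recursive DFS by an iterative explicit-stack post-order traversal (alternative
-- decomposition, same cost); the equivalence proved here is about the RETURN value only — the
-- Python programs perform the same `sol.append` mutations, but the ports do not model `sol`.

-- ===== PORT A =====
-- A is general recursion (it diverges on cyclic inputs), so the port totalises it with a fuel
-- parameter; `none` is fuel exhaustion or a Python IndexError.  `fuelA` is provably enough on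
-- every input admitted by Pre_dfs.
mutual
def dfsA (h_ : List Int) (adj : List (List Int)) (avg : Int) : Nat → Int → Int → Option Int
  | 0, _, _ => none
  | fuel+1, u, p =>
    match PySem.List.pyGet? adj u with
    | none => none                     -- adj[u]: IndexError
    | some ns =>
      match goA h_ adj avg fuel ns u p 0 with   -- the for-loop over adj[u]
      | none => none
      | some acc =>
        match PySem.List.pyGet? h_ u with
        | none => none                 -- h[u]: IndexError
        | some hu => some (acc + hu - avg)
  termination_by fuel => (fuel, 0, 0)
def goA (h_ : List Int) (adj : List (List Int)) (avg : Int) : Nat → List Int → Int → Int → Int → Option Int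
  | _, [], _, _, acc => some acc
  | fuel, v :: t, node, par, acc =>
    if v = par then goA h_ adj avg fuel t node par acc
    else
      match dfsA h_ adj avg fuel v node with
      | none => none
      | some b => goA h_ adj avg fuel t node par (acc + b)
  termination_by fuel l => (fuel, 1, l.length)
end

def bigN (adj : List (List Int)) : Nat := ((adj.flatMap (fun x => x)).dedup.length + 2) ^ 2
def fuelA (adj : List (List Int)) : Nat := bigN adj + 1

def dfs (u : Int) (p : Int) (h_ : List Int) (adj : List (List Int)) (avg : Int) (sol : List (Int × Int × Int)) : Int :=
  (dfsA h_ adj avg (fuelA adj) u p).getD 0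

-- ===== PORT B =====
-- find the next child index ≥ i whose entry differs from the parent (the inner while-loop of B)
def findNextAux : List Int → Nat → Int → Option (Nat × Int)
  | [], _, _ => none
  | v :: t, i, par => if v = par then findNextAux t (i+1) par else some (i, v)

-- one fuel unit per iteration of B's while-loop; frames are (node, parent, next index, acc)
def runB (h_ : List Int) (adj : List (List Int)) (avg : Int) : Nat → List (Int × Int × Nat × Int) → Option Int → Option Int
  | 0, _, _ => none
  | _+1, [], ret => ret
  | g+1, (node, par, i, acc) :: rest, ret =>
    match PySem.List.pyGet? adj node with
    | none => none                     -- adj[node]: IndexError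
    | some ns =>
      match (match ret with            -- returning from a finished child: merge its balance
             | none => some acc
             | some b => (PySem.List.pyGet? ns ((i : Int) - 1)).map (fun _ => acc + b)) with
      | none => none
      | some acc' =>
        match findNextAux (ns.drop i) i par with
        | some (j, v) => runB h_ adj avg g ((v, node, 0, 0) :: (node, par, j+1, acc') :: rest) none
        | none =>
          match PySem.List.pyGet? h_ node with
          | none => none               -- h[node]: IndexError
          | some hn => runB h_ adj avg g rest (some (acc' + hn - avg))

def bigM (adj : List (List Int)) : Nat := (adj.flatMap (fun x => x)).length
-- step budget: enough while-loop iterations to simulate a depth-f recursion (proved below)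
def kbB (adj : List (List Int)) : Nat → Nat
  | 0 => 2
  | f+1 => bigM adj * kbB adj f + 2
def fuelB (adj : List (List Int)) : Nat := kbB adj (fuelA adj)

def dfs_alt (u : Int) (p : Int) (h_ : List Int) (adj : List (List Int)) (avg : Int) (sol : List (Int × Int × Int)) : Int :=
  (runB h_ adj avg (fuelB adj) [(u, p, 0, 0)] none).getD 0

-- ===== PRECONDITION & SPEC =====
-- A's call states are pairs (node, parent); a state steps to (v, node) for each v ≠ parent in adj[node].
def succsP (adj : List (List Int)) (s : Int × Int) : List (Int × Int) :=
  match PySem.List.pyGet? adj s.1 with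
  | none => []
  | some ns => (ns.filter (fun v => v ≠ s.2)).map (fun v => (v, s.1))

def succsD (adj : List (List Int)) (S : List (Int × Int)) : List (Int × Int) :=
  (S.flatMap (succsP adj)).dedup

-- states reachable by walks of exactly k steps
def layerL (adj : List (List Int)) : Nat → List (Int × Int) → List (Int × Int)
  | 0, S => S
  | k+1, S => layerL adj k (succsD adj S)

def validSt (h_ : List Int) (adj : List (List Int)) (s : Int × Int) : Bool :=
  (PySem.List.pyGet? adj s.1).isSome && (PySem.List.pyGet? h_ s.1).isSome

-- Pre_dfs = exactly the inputs on which the Python A returns: every call state reachable from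
-- (u, p) in the call graph has in-range indices into adj and h, and no walk in the call graph is
-- longer than the number of distinct states (bigN bounds it), i.e. the recursion terminates.
def Pre_dfs (u : Int) (p : Int) (h_ : List Int) (adj : List (List Int)) (avg : Int) (sol : List (Int × Int × Int)) : Prop :=
  (∀ i < bigN adj + 1, ∀ s ∈ layerL adj i [(u, p)], validSt h_ adj s = true) ∧
  layerL adj (bigN adj + 1) [(u, p)] = []
instance (u : Int) (p : Int) (h_ : List Int) (adj : List (List Int)) (avg : Int) (sol : List (Int × Int × Int)) : Decidable (Pre_dfs u p h_ adj avg sol) := by unfold Pre_dfs; infer_instance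

def pvWitness_dfs : Int × Int × List Int × List (List Int) × Int × (List (Int × Int × Int)) :=
  (0, -1, [3], [[]], 2, [])

def Spec_dfs (u : Int) (p : Int) (h_ : List Int) (adj : List (List Int)) (avg : Int) (sol : List (Int × Int × Int)) (out : Int) : Prop := out = dfs_alt u p h_ adj avg sol
instance (u : Int) (p : Int) (h_ : List Int) (adj : List (List Int)) (avg : Int) (sol : List (Int × Int × Int)) (out : Int) : Decidable (Spec_dfs u p h_ adj avg sol out) := by unfold Spec_dfs; infer_instance

-- ===== CLAIM (what is proved, stated in full; the proofs are below) =====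
def Claim_equal_dfs : Prop := ∀ (u : Int) (p : Int) (h_ : List Int) (adj : List (List Int)) (avg : Int) (sol : List (Int × Int × Int)), Dom_dfs u p h_ adj avg sol → Pre_dfs u p h_ adj avg sol → Spec_dfs u p h_ adj avg sol (dfs u p h_ adj avg sol)

-- ===== LEMMAS AND PROOFS =====

theorem layerL_mono (adj : List (List Int)) : ∀ (k : Nat) (S S' : List (Int × Int)),
    (∀ x ∈ S, x ∈ S') → ∀ x ∈ layerL adj k S, x ∈ layerL adj k S' := by
  intro k
  induction k with
  | zero => intro S S' h x hx; exact h x hx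
  | succ k ih =>
    intro S S' h x hx
    refine ih _ _ ?_ x hx
    intro y hy
    simp only [succsD, List.mem_dedup, List.mem_flatMap] at hy ⊢
    obtain ⟨a, ha, hya⟩ := hy
    exact ⟨a, h a ha, hya⟩

theorem mem_succsD_single (adj : List (List Int)) (s t : Int × Int) :
    t ∈ succsD adj [s] ↔ t ∈ succsP adj s := by
  simp [succsD, List.mem_dedup]

-- A terminates within its fuel on every Pre_-admitted input
theorem dfsA_some (h_ : List Int) (adj : List (List Int)) (avg : Int) : ∀ (f : Nat) (s : Int × Int),
    (∀ i < f, ∀ t ∈ layerL adj i [s], validSt h_ adj t = true) →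
    layerL adj f [s] = [] →
    ∃ r, dfsA h_ adj avg f s.1 s.2 = some r := by
  intro f
  induction f with
  | zero => intro s _ he; simp [layerL] at he
  | succ f ih =>
    intro s hv he
    have hs : validSt h_ adj s = true := hv 0 (by omega) s (by simp [layerL])
    simp only [validSt, Bool.and_eq_true, Option.isSome_iff_exists] at hs
    obtain ⟨⟨ns, hadj⟩, ⟨hu, hh⟩⟩ := hs
    have hchild : ∀ v ∈ ns, v ≠ s.2 → ∃ b, dfsA h_ adj avg f v s.1 = some b := by
      intro v hvns hne
      have hmem : (v, s.1) ∈ succsD adj [s] := by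
        rw [mem_succsD_single]
        simp only [succsP, hadj, List.mem_map, List.mem_filter]
        exact ⟨v, ⟨hvns, by simpa using hne⟩, rfl⟩
      refine ih (v, s.1) ?_ ?_
      · intro i hi t ht
        have ht' : t ∈ layerL adj i (succsD adj [s]) :=
          layerL_mono adj i _ _ (by intro x hx; simp at hx; subst hx; exact hmem) t ht
        exact hv (i+1) (by omega) t ht'
      · apply List.eq_nil_iff_forall_not_mem.mpr
        intro x hx
        have hx' : x ∈ layerL adj f (succsD adj [s]) :=
          layerL_mono adj f _ _ (by intro y hy; simp at hy; subst hy; exact hmem) x hx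
        have : x ∈ layerL adj (f+1) [s] := hx'
        rw [he] at this
        simp at this
    have hgo : ∀ l, (∀ v ∈ l, v ∈ ns) → ∀ acc, ∃ acc', goA h_ adj avg f l s.1 s.2 acc = some acc' := by
      intro l
      induction l with
      | nil => intro _ acc; exact ⟨acc, by simp [goA]⟩
      | cons v t iht =>
        intro hsub acc
        by_cases hvp : v = s.2
        · obtain ⟨acc', h'⟩ := iht (fun x hx => hsub x (List.mem_cons_of_mem _ hx)) acc
          exact ⟨acc', by simp [goA, hvp, h']⟩
        · obtain ⟨b, hb⟩ := hchild v (hsub v List.mem_cons_self) hvp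
          obtain ⟨acc', h'⟩ := iht (fun x hx => hsub x (List.mem_cons_of_mem _ hx)) (acc + b)
          exact ⟨acc', by simp [goA, hvp, hb, h']⟩
    obtain ⟨acc, hacc⟩ := hgo ns (fun _ h => h) 0
    exact ⟨acc + hu - avg, by simp [dfsA, hadj, hacc, hh]⟩

theorem runB_mono (h_ : List Int) (adj : List (List Int)) (avg : Int) :
    ∀ (g g' : Nat), g ≤ g' → ∀ S ret r, runB h_ adj avg g S ret = some r → runB h_ adj avg g' S ret = some r := by
  intro g
  induction g with
  | zero => intro g' _ S ret r h; simp [runB] at h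
  | succ g ih =>
    intro g' hle S ret r h
    obtain ⟨g'', rfl⟩ : ∃ g'', g' = g'' + 1 := ⟨g' - 1, by omega⟩
    cases S with
    | nil => simp only [runB] at h ⊢; exact h
    | cons fr rest =>
      obtain ⟨node, par, i, acc⟩ := fr
      simp only [runB] at h ⊢
      cases hadj : PySem.List.pyGet? adj node with
      | none => rw [hadj] at h; simp at h
      | some ns =>
        rw [hadj] at h
        dsimp only at h ⊢
        cases hacc : (match ret with
                      | none => some acc
                      | some b => (PySem.List.pyGet? ns ((i : Int) - 1)).map (fun _ => acc + b)) with
        | none => rw [hacc] at h; simp at h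
        | some acc' =>
          rw [hacc] at h
          dsimp only at h ⊢
          cases hf : findNextAux (ns.drop i) i par with
          | some jv =>
            rw [hf] at h
            dsimp only at h ⊢
            exact ih _ (by omega) _ _ _ h
          | none =>
            rw [hf] at h
            dsimp only at h ⊢
            cases hh : PySem.List.pyGet? h_ node with
            | none => rw [hh] at h; simp at h
            | some hn =>
              rw [hh] at h
              dsimp only at h ⊢
              exact ih _ (by omega) _ _ _ h

-- merging a finished child's balance is the same as starting the parent frame with it added
theorem runB_retmerge (h_ : List Int) (adj : List (List Int)) (avg : Int)
    (node par acc b : Int) (i : Nat) (ns : List Int) (v : Int) (rest : List (Int × Int × Nat × Int))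
    (hadj : PySem.List.pyGet? adj node = some ns) (hi : ns[i]? = some v) (G : Nat) :
    runB h_ adj avg (G+1) ((node, par, i+1, acc) :: rest) (some b)
      = runB h_ adj avg (G+1) ((node, par, i+1, acc+b) :: rest) none := by
  have hcast : ((i+1 : Nat) : Int) - 1 = ((i : Nat) : Int) := by push_cast; ring
  simp only [runB, hadj, hcast, PySem.List.pyGet?_natCast, hi, Option.map_some]

-- B's machine simulates A's recursion step-exactly
theorem runB_sim (h_ : List Int) (adj : List (List Int)) (avg : Int) : ∀ (f : Nat) (u p r : Int),
    dfsA h_ adj avg f u p = some r →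
    ∀ rest, ∃ k, k + 2 ≤ kbB adj f ∧
      ∀ g, runB h_ adj avg (g + (k+1)) ((u, p, 0, 0) :: rest) none = runB h_ adj avg g rest (some r) := by
  intro f
  induction f with
  | zero => intro u p r h; simp [dfsA] at h
  | succ f ih =>
    intro u p r h rest
    rw [dfsA] at h
    cases hadj : PySem.List.pyGet? adj u with
    | none => rw [hadj] at h; simp at h
    | some ns =>
      rw [hadj] at h; dsimp only at h
      cases hgo : goA h_ adj avg f ns u p 0 with
      | none => rw [hgo] at h; simp at h
      | some acc =>
        rw [hgo] at h; dsimp only at h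
        cases hh : PySem.List.pyGet? h_ u with
        | none => rw [hh] at h; simp at h
        | some hu =>
          rw [hh] at h; dsimp only at h
          have hr : r = acc + hu - avg := by
            have := h; injection this with h'; omega
          subst hr
          -- the inner while-loop simulation, by induction on the remaining children
          have inner : ∀ (l : List Int), ∀ (i : Nat) (acc0 acc' : Int),
              ns.drop i = l → goA h_ adj avg f l u p acc0 = some acc' →
              ∀ (rest' : List (Int × Int × Nat × Int)), ∃ k, k + 2 ≤ l.length * kbB adj f + 2 ∧
                ∀ g, runB h_ adj avg (g + (k+1)) ((u, p, i, acc0) :: rest') none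
                    = runB h_ adj avg g rest' (some (acc' + hu - avg)) := by
            intro l
            induction l with
            | nil =>
              intro i acc0 acc' hl hg rest'
              have hacc : acc' = acc0 := by simp [goA] at hg; omega
              subst hacc
              refine ⟨0, by omega, ?_⟩
              intro g
              simp only [runB, hadj, hl, findNextAux, hh]
            | cons v t iht =>
              intro i acc0 acc' hl hg rest'
              have hi : i < ns.length := by
                by_contra hc
                rw [List.drop_eq_nil_of_le (by omega)] at hl
                simp at hl
              have hdrop1 : ns.drop (i+1) = t := by
                rw [← List.tail_drop, hl]
                rfl
              have hgetv : ns[i]? = some v := by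
                have h0 : (List.drop i ns)[0]? = ns[i+0]? := List.getElem?_drop
                rw [hl] at h0
                simpa using h0.symm
              by_cases hvp : v = p
              · -- skipped child (v == parent)
                rw [goA, if_pos hvp] at hg
                obtain ⟨k, hk, H⟩ := iht (i+1) acc0 acc' hdrop1 hg rest'
                have hmul : (t.length+1) * kbB adj f = t.length * kbB adj f + kbB adj f := by ring
                refine ⟨k, by simp only [List.length_cons]; omega, ?_⟩
                intro g
                have hstep : runB h_ adj avg (g+k+1) ((u, p, i, acc0) :: rest') none
                    = runB h_ adj avg (g+k+1) ((u, p, i+1, acc0) :: rest') none := by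
                  simp only [runB, hadj, hl, hdrop1, findNextAux, if_pos hvp]
                calc runB h_ adj avg (g + (k+1)) ((u, p, i, acc0) :: rest') none
                    = runB h_ adj avg (g+k+1) ((u, p, i+1, acc0) :: rest') none := hstep
                  _ = runB h_ adj avg g rest' (some (acc' + hu - avg)) := H g
              · -- real child: recurse into it, then continue from index i+1
                rw [goA, if_neg hvp] at hg
                cases hb : dfsA h_ adj avg f v u with
                | none => rw [hb] at hg; simp at hg
                | some b =>
                  rw [hb] at hg; dsimp only at hg
                  obtain ⟨k₁, hk₁, H₁⟩ := ih v u b hb ((u, p, i+1, acc0) :: rest')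
                  obtain ⟨k₂, hk₂, H₂⟩ := iht (i+1) (acc0 + b) acc' hdrop1 hg rest'
                  have hmul : (t.length+1) * kbB adj f = t.length * kbB adj f + kbB adj f := by ring
                  refine ⟨k₁ + k₂ + 2, by simp only [List.length_cons]; omega, ?_⟩
                  intro g
                  have hstep : runB h_ adj avg (g + (k₁+k₂+3)) ((u, p, i, acc0) :: rest') none
                      = runB h_ adj avg (g+k₂+1 + (k₁+1)) ((v, u, 0, 0) :: (u, p, i+1, acc0) :: rest') none := by
                    have harith : g + (k₁+k₂+3) = (g+k₂+1 + (k₁+1)) + 1 := by omega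
                    rw [harith]
                    simp only [runB, hadj, hl, findNextAux, if_neg hvp]
                  calc runB h_ adj avg (g + (k₁+k₂+2+1)) ((u, p, i, acc0) :: rest') none
                      = runB h_ adj avg (g+k₂+1 + (k₁+1)) ((v, u, 0, 0) :: (u, p, i+1, acc0) :: rest') none := hstep
                    _ = runB h_ adj avg (g+k₂+1) ((u, p, i+1, acc0) :: rest') (some b) := H₁ (g+k₂+1)
                    _ = runB h_ adj avg (g+k₂+1) ((u, p, i+1, acc0+b) :: rest') none :=
                        runB_retmerge h_ adj avg u p acc0 b i ns v rest' hadj hgetv (g+k₂)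
                    _ = runB h_ adj avg g rest' (some (acc' + hu - avg)) := H₂ g
          obtain ⟨k, hk, H⟩ := inner ns 0 0 acc (by simp) hgo rest
          have hlen : ns.length ≤ bigM adj := by
            have hmem : ns ∈ adj := PySem.List.mem_of_pyGet?_eq_some adj hadj
            have : ns.length ∈ adj.map (fun a => a.length) := List.mem_map.mpr ⟨ns, hmem, rfl⟩
            have := List.single_le_sum (l := adj.map (fun a => a.length)) (fun _ _ => Nat.zero_le _) _ this
            simpa [bigM, List.length_flatMap] using this
          have hbound : ns.length * kbB adj f ≤ bigM adj * kbB adj f := Nat.mul_le_mul_right _ hlen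
          exact ⟨k, by simp only [kbB]; omega, H⟩

-- ===== VERDICT (by name: the statement is the Claim_ definition above) =====
theorem dfs_spec : Claim_equal_dfs := by
  intro u p h_ adj avg sol _dom pre
  unfold Spec_dfs
  obtain ⟨hv, he⟩ := pre
  obtain ⟨r, hr⟩ := dfsA_some h_ adj avg (fuelA adj) (u, p)
    (by simpa [fuelA] using hv) (by simpa [fuelA] using he)
  obtain ⟨k, hk, H⟩ := runB_sim h_ adj avg (fuelA adj) u p r hr []
  have h1 : runB h_ adj avg (1 + (k+1)) [(u, p, 0, 0)] none = some r := by
    rw [H 1]; simp [runB]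
  have h2 : runB h_ adj avg (fuelB adj) [(u, p, 0, 0)] none = some r :=
    runB_mono h_ adj avg (1+(k+1)) (fuelB adj) (by unfold fuelB; omega) _ _ _ h1
  unfold dfs dfs_alt
  rw [hr, h2]
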